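-- pv_equiv track=rewrite | github.com/p-b-d-z/pybluecat | tests/helper_functions.py | sort_and_filter_list_of_dicts
-- ===== SOURCE A (Python) =====
-- def sort_and_filter_list_of_dicts(list_of_dicts, unique_key):
--     sorted_list = sorted(list_of_dicts, key=lambda x: x[unique_key])
--     unique_entries = []
--     unique_keys = set()
--
--     for entry in sorted_list:
--         key_value = entry[unique_key]
--         if key_value not in unique_keys:
--             unique_entries.append(entry)
--             unique_keys.add(key_value)
--
--     return unique_entries
-- ===== SOURCE B (Python) =====
-- def sort_and_filter_list_of_dicts(list_of_dicts, unique_key):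
--     seen = {}
--     for entry in list_of_dicts:
--         key_value = entry[unique_key]
--         if key_value not in seen:
--             seen[key_value] = entry
--     return sorted(seen.values(), key=lambda x: x[unique_key])
-- ===== Notes on version B (the rewrite author's own statement) =====
-- stated objective: simpler
-- what changed: B reverses the pass order: it deduplicates first with a single key->entry dict (first occurrence wins) and sorts only the survivors, instead of A's sort-everything-then-scan with a parallel set and list; stability of Python's sort makes the survivors identical.
import Mathlib
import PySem

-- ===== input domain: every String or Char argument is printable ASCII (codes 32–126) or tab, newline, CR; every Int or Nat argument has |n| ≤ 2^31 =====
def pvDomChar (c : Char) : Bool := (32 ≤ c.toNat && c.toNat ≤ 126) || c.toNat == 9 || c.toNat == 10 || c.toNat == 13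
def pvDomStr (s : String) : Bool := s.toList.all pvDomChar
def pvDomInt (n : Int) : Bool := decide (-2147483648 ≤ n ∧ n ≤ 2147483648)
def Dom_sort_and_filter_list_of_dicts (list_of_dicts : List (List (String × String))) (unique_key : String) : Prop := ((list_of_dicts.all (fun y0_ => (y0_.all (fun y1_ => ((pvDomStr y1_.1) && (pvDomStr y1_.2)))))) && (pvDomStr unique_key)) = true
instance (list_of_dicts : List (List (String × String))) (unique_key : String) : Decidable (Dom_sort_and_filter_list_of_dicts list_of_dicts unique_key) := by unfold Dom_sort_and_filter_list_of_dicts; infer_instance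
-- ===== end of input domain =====

-- B deduplicates first (one key->entry dict, first occurrence wins) and sorts only the survivors,
-- instead of A's sort-everything-then-scan with a parallel set and list (objective: simpler).

-- shared helper: entry[unique_key] (dict lookup = first match); exact on entries that contain the
-- key — Pre_ excludes the KeyError case, where this helper defaults to "".
def pvGetKey (entry : List (String × String)) (k : String) : String :=
  ((entry.find? (fun p => p.1 == k)).map (fun p => p.2)).getD ""

-- ===== PORT A =====
def sort_and_filter_list_of_dicts (list_of_dicts : List (List (String × String))) (unique_key : String) : List (List (String × String)) :=
  let sorted_list := PySem.List.sorted list_of_dicts (fun x => pvGetKey x unique_key) false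
  (sorted_list.foldl
    (fun (st : List (List (String × String)) × PySem.Set String) entry =>
      let key_value := pvGetKey entry unique_key
      if key_value ∉ st.2 then (st.1 ++ [entry], PySem.Set.add st.2 key_value) else st)
    ([], PySem.Set.empty)).1

-- ===== PORT B =====
def sort_and_filter_list_of_dicts_alt (list_of_dicts : List (List (String × String))) (unique_key : String) : List (List (String × String)) :=
  let seen := list_of_dicts.foldl
    (fun (seen : PySem.Dict String (List (String × String))) entry =>
      let key_value := pvGetKey entry unique_key
      if ¬ seen.contains key_value then seen.insert key_value entry else seen)
    PySem.Dict.empty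
  PySem.List.sorted seen.values (fun x => pvGetKey x unique_key) false

-- ===== PRECONDITION & SPEC =====
-- Pre_ excludes exactly the inputs on which Python's entry[unique_key] raises KeyError
-- (in A inside sorted's key lambda): some entry without the unique key.
def Pre_sort_and_filter_list_of_dicts (list_of_dicts : List (List (String × String))) (unique_key : String) : Prop :=
  list_of_dicts.all (fun entry => (entry.find? (fun p => p.1 == unique_key)).isSome) = true
instance (list_of_dicts : List (List (String × String))) (unique_key : String) : Decidable (Pre_sort_and_filter_list_of_dicts list_of_dicts unique_key) := by unfold Pre_sort_and_filter_list_of_dicts; infer_instance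
def pvWitness_sort_and_filter_list_of_dicts : (List (List (String × String))) × String :=
  ([[("id", "2"), ("name", "b")], [("id", "1"), ("name", "a")], [("id", "2"), ("name", "c")]], "id")

def Spec_sort_and_filter_list_of_dicts (list_of_dicts : List (List (String × String))) (unique_key : String) (out : List (List (String × String))) : Prop := out = sort_and_filter_list_of_dicts_alt list_of_dicts unique_key
instance (list_of_dicts : List (List (String × String))) (unique_key : String) (out : List (List (String × String))) : Decidable (Spec_sort_and_filter_list_of_dicts list_of_dicts unique_key out) := by unfold Spec_sort_and_filter_list_of_dicts; infer_instance

-- ===== CLAIM (what is proved, stated in full; the proofs are below) =====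
def Claim_equal_sort_and_filter_list_of_dicts : Prop := ∀ (list_of_dicts : List (List (String × String))) (unique_key : String), Dom_sort_and_filter_list_of_dicts list_of_dicts unique_key → Pre_sort_and_filter_list_of_dicts list_of_dicts unique_key → Spec_sort_and_filter_list_of_dicts list_of_dicts unique_key (sort_and_filter_list_of_dicts list_of_dicts unique_key)

-- ===== LEMMAS AND PROOFS =====

-- first-occurrence-per-key deduplication, the common core of both loops
def dedupF {α : Type} (f : α → String) : List α → PySem.Set String → List α
  | [], _ => []
  | x :: xs, seen =>
    if f x ∈ seen then dedupF f xs seen else x :: dedupF f xs (PySem.Set.add seen (f x))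

theorem set_add_of_not_mem {s : PySem.Set String} {x : String} (h : x ∉ s) :
    PySem.Set.add s x = s ++ [x] := by
  simp [PySem.Set.add, h]

theorem foldlA_eq_dedupF {α : Type} (f : α → String) (l : List α)
    (acc : List α) (seen : PySem.Set String) :
    (l.foldl (fun (st : List α × PySem.Set String) x =>
        if f x ∉ st.2 then (st.1 ++ [x], PySem.Set.add st.2 (f x)) else st) (acc, seen)).1
      = acc ++ dedupF f l seen := by
  induction l generalizing acc seen with
  | nil => simp [dedupF]
  | cons x xs ih =>
    rw [List.foldl_cons]
    by_cases h : f x ∈ seen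
    · rw [if_neg (not_not_intro h), ih]
      simp only [dedupF, if_pos h]
    · rw [if_pos h, ih]
      simp only [dedupF, if_neg h]
      simp

theorem foldlB_values_eq_dedupF {α : Type} (f : α → String) (l : List α)
    (d : PySem.Dict String α) (hnd : d.keys.Nodup) :
    (l.foldl (fun (d : PySem.Dict String α) x =>
        if ¬ d.contains (f x) then d.insert (f x) x else d) d).values
      = d.values ++ dedupF f l d.keys := by
  induction l generalizing d with
  | nil => simp [dedupF]
  | cons x xs ih =>
    rw [List.foldl_cons]
    by_cases h : d.contains (f x)
    · rw [if_neg (not_not_intro h), ih d hnd]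
      simp only [dedupF, if_pos ((PySem.Dict.contains_iff_mem_keys d _).mp h)]
    · have hc : d.contains (f x) = false := by revert h; cases d.contains (f x) <;> simp
      have hk : f x ∉ d.keys := fun hm => h ((PySem.Dict.contains_iff_mem_keys d _).mpr hm)
      rw [if_pos h, ih (d.insert (f x) x) (PySem.Dict.nodup_keys_insert d (f x) x hnd)]
      have hv : (d.insert (f x) x).values = d.values ++ [x] := by
        simp [PySem.Dict.values, PySem.Dict.items_insert_of_not_contains (h := hc)]
      rw [hv, PySem.Dict.keys_insert_of_not_contains d x hc]
      simp only [dedupF, if_neg hk, set_add_of_not_mem hk, List.append_assoc,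
        List.singleton_append]

theorem dedupF_sublist {α : Type} (f : α → String) (l : List α) (s : PySem.Set String) :
    (dedupF f l s).Sublist l := by
  induction l generalizing s with
  | nil => simp [dedupF]
  | cons x xs ih =>
    by_cases h : f x ∈ s
    · simp only [dedupF, if_pos h]
      exact (ih s).cons x
    · simp only [dedupF, if_neg h]
      exact (ih _).cons₂ x

theorem dedupF_keys_fresh {α : Type} (f : α → String) (l : List α) (s : PySem.Set String) :
    ∀ e ∈ dedupF f l s, f e ∉ s := by
  induction l generalizing s with
  | nil => simp [dedupF]
  | cons x xs ih =>
    intro e he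
    by_cases h : f x ∈ s
    · simp only [dedupF, if_pos h] at he
      exact ih s e he
    · simp only [dedupF, if_neg h, List.mem_cons] at he
      rcases he with rfl | he
      · exact h
      · intro hmem
        exact ih _ e he (by simp [set_add_of_not_mem h, hmem])

theorem dedupF_pairwise_ne {α : Type} (f : α → String) (l : List α) (s : PySem.Set String) :
    (dedupF f l s).Pairwise (fun a b => f a ≠ f b) := by
  induction l generalizing s with
  | nil => simp [dedupF]
  | cons x xs ih =>
    by_cases h : f x ∈ s
    · simp only [dedupF, if_pos h]; exact ih s
    · simp only [dedupF, if_neg h]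
      refine List.Pairwise.cons ?_ (ih _)
      intro b hb heq
      have := dedupF_keys_fresh f xs (PySem.Set.add s (f x)) b hb
      exact this (by simp [set_add_of_not_mem h, ← heq])

theorem dedupF_nodup {α : Type} (f : α → String) (l : List α) (s : PySem.Set String) :
    (dedupF f l s).Nodup := by
  exact (dedupF_pairwise_ne f l s).imp (fun h => by intro he; exact h (by rw [he]))

theorem mem_dedupF {α : Type} (f : α → String) (l : List α) (s : PySem.Set String) (e : α) :
    e ∈ dedupF f l s ↔ f e ∉ s ∧ l.find? (fun y => f y == f e) = some e := by
  induction l generalizing s with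
  | nil => simp [dedupF]
  | cons x xs ih =>
    by_cases hfe : f x = f e
    · rw [List.find?_cons_of_pos (by simp [hfe])]
      by_cases h : f x ∈ s
      · simp only [dedupF, if_pos h, ih]
        constructor
        · rintro ⟨hns, -⟩; exact absurd (hfe ▸ h) hns
        · rintro ⟨hns, -⟩; exact absurd (hfe ▸ h) hns
      · simp only [dedupF, if_neg h, List.mem_cons, ih]
        constructor
        · rintro (rfl | ⟨hns, hf⟩)
          · exact ⟨hfe ▸ h, rfl⟩
          · exact absurd (by simp [hfe]) hns
        · rintro ⟨-, hx⟩
          exact Or.inl (Option.some.inj hx).symm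
    · rw [List.find?_cons_of_neg (by simp [hfe])]
      by_cases h : f x ∈ s
      · simp only [dedupF, if_pos h, ih]
      · simp only [dedupF, if_neg h, List.mem_cons, ih]
        constructor
        · rintro (rfl | ⟨hns, hf⟩)
          · exact absurd rfl hfe
          · refine ⟨fun hm => hns ?_, hf⟩
            simp [hm]
        · rintro ⟨hns, hf⟩
          refine Or.inr ⟨?_, hf⟩
          simp only [set_add_of_not_mem h, List.mem_append, List.mem_singleton]
          rintro (hm | hm)
          · exact hns hm
          · exact hfe hm.symm

theorem find?_insertBy {α : Type} (f : α → String) (v : String) (x : α) (acc : List α)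
    (hp : acc.Pairwise (fun a b => f a ≤ f b)) :
    (PySem.List.insertBy (fun a b => decide (f a < f b)) x acc).find? (fun y => f y == v)
      = (acc.find? (fun y => f y == v)).or (if f x == v then some x else none) := by
  induction acc with
  | nil =>
    by_cases hx : f x = v <;> simp [PySem.List.insertBy, hx]
  | cons y ys ih =>
    simp only [PySem.List.insertBy]
    by_cases hlt : f x < f y
    · rw [if_pos (by simpa using hlt)]
      by_cases hx : f x = v
      · have hnone : (y :: ys).find? (fun z => f z == v) = none := by
          rw [List.find?_eq_none]
          intro z hz
          have hvz : v < f z := by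
            rcases List.mem_cons.mp hz with rfl | hz
            · exact hx ▸ hlt
            · exact hx ▸ lt_of_lt_of_le hlt ((List.pairwise_cons.mp hp).1 z hz)
          simp [ne_of_gt hvz]
        rw [List.find?_cons_of_pos (by simp [hx]), hnone]
        simp [hx]
      · rw [List.find?_cons_of_neg (by simp [hx])]
        simp [hx]
    · rw [if_neg (by simpa using hlt)]
      by_cases hy : f y = v
      · rw [List.find?_cons_of_pos (p := fun z => f z == v) (by simp [hy]),
            List.find?_cons_of_pos (p := fun z => f z == v) (by simp [hy])]
        simp
      · rw [List.find?_cons_of_neg (p := fun z => f z == v) (by simp [hy]),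
            List.find?_cons_of_neg (p := fun z => f z == v) (by simp [hy]),
            ih (List.Pairwise.of_cons hp)]

theorem insertBy_pairwise {α : Type} (f : α → String) (x : α) (acc : List α)
    (hp : acc.Pairwise (fun a b => f a ≤ f b)) :
    (PySem.List.insertBy (fun a b => decide (f a < f b)) x acc).Pairwise (fun a b => f a ≤ f b) := by
  induction acc with
  | nil => simp [PySem.List.insertBy]
  | cons y ys ih =>
    simp only [PySem.List.insertBy]
    by_cases hlt : f x < f y
    · rw [if_pos (by simpa using hlt)]
      refine List.Pairwise.cons ?_ hp
      intro z hz
      rcases List.mem_cons.mp hz with rfl | hz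
      · exact le_of_lt hlt
      · exact le_of_lt (lt_of_lt_of_le hlt ((List.pairwise_cons.mp hp).1 z hz))
    · rw [if_neg (by simpa using hlt)]
      refine List.Pairwise.cons ?_ (ih (List.Pairwise.of_cons hp))
      intro z hz
      rcases (PySem.List.mem_insertBy _ _ _ _).mp hz with rfl | hz
      · exact le_of_not_gt hlt
      · exact (List.pairwise_cons.mp hp).1 z hz

theorem find?_foldl_insertBy {α : Type} (f : α → String) (v : String) (l : List α) (acc : List α)
    (hp : acc.Pairwise (fun a b => f a ≤ f b)) :
    (l.foldl (fun acc x => PySem.List.insertBy (fun a b => decide (f a < f b)) x acc) acc).find? (fun y => f y == v)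
      = (acc.find? (fun y => f y == v)).or (l.find? (fun y => f y == v)) := by
  induction l generalizing acc with
  | nil => simp
  | cons x xs ih =>
    rw [List.foldl_cons, ih _ (insertBy_pairwise f x acc hp), find?_insertBy f v x acc hp,
        Option.or_assoc]
    congr 1
    by_cases hx : f x = v
    · rw [List.find?_cons_of_pos (by simp [hx])]
      simp [hx]
    · rw [List.find?_cons_of_neg (by simp [hx])]
      simp [hx]

theorem find?_sorted {α : Type} (f : α → String) (v : String) (l : List α) :
    (PySem.List.sorted l f false).find? (fun y => f y == v) = l.find? (fun y => f y == v) := by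
  rw [PySem.List.sorted_eq_foldl_insertBy, find?_foldl_insertBy f v l [] (by simp)]
  simp

theorem dedupF_sorted_eq {α : Type} (f : α → String) (l : List α) :
    PySem.List.sorted (dedupF f l PySem.Set.empty) f false
      = dedupF f (PySem.List.sorted l f false) PySem.Set.empty := by
  apply PySem.List.sorted_eq_of_perm_of_pairwise_lt
  · rw [List.perm_ext_iff_of_nodup (dedupF_nodup f _ _) (dedupF_nodup f _ _)]
    intro e
    simp [mem_dedupF, find?_sorted, PySem.Set.empty]
  · have hle : (dedupF f (PySem.List.sorted l f false) PySem.Set.empty).Pairwise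
        (fun a b => f a ≤ f b) :=
      (PySem.List.sorted_pairwise l f).sublist (dedupF_sublist f _ _)
    have hne := dedupF_pairwise_ne f (PySem.List.sorted l f false) PySem.Set.empty
    exact (hle.and hne).imp (fun h => lt_of_le_of_ne h.1 h.2)

-- ===== VERDICT (by name: the statement is the Claim_ definition above) =====
theorem sort_and_filter_list_of_dicts_spec : Claim_equal_sort_and_filter_list_of_dicts := by
  intro l uk _ _
  unfold Spec_sort_and_filter_list_of_dicts
  unfold sort_and_filter_list_of_dicts sort_and_filter_list_of_dicts_alt
  simp only []
  rw [foldlA_eq_dedupF (fun x => pvGetKey x uk)]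
  rw [foldlB_values_eq_dedupF (fun x => pvGetKey x uk) l PySem.Dict.empty (by simp [PySem.Dict.keys_empty])]
  simp only [PySem.Dict.keys_empty, PySem.Dict.values, List.nil_append]
  exact (dedupF_sorted_eq (fun x => pvGetKey x uk) l).symm
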